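-- pv_equiv track=rewrite | github.com/yudakov21/lego_parser | services/parser.py | get_toys_info
-- ===== SOURCE A (Python) =====
-- def get_toys_info(toy_data):
--     t_data = {
--         'age': None,
--         'pieces': None,
--         'rating': None
--     }
--
--     for d in toy_data:
--         if '+' in d:
--             t_data['age'] = d
--         elif '.' in d:
--             t_data['rating'] = d
--         else:
--             t_data['pieces'] = d
--
--     return t_data
-- ===== SOURCE B (Python) =====
-- def get_toys_info(toy_data):
--     def last(pred):
--         return next((d for d in reversed(toy_data) if pred(d)), None)
--     return {
--         'age': last(lambda d: '+' in d),
--         'pieces': last(lambda d: '+' not in d and '.' not in d),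
--         'rating': last(lambda d: '+' not in d and '.' in d),
--     }
-- ===== Notes on version B (the rewrite author's own statement) =====
-- stated objective: alternative
-- what changed: Replaces the single mutating last-wins loop over a dict with three independent reverse-scan selections (first match in reversed order) for age/pieces/rating.
import Mathlib
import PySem

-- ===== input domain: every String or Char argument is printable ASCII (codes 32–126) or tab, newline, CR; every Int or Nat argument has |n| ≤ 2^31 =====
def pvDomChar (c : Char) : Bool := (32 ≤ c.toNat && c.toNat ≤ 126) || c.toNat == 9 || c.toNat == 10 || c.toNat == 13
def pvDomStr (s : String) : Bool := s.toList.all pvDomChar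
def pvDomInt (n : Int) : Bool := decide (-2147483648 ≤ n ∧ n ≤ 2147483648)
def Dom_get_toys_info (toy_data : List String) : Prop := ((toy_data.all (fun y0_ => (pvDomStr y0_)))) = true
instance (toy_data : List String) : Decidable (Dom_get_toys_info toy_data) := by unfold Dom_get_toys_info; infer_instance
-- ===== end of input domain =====

-- B replaces A's single mutating last-wins loop by three independent reverse scans (one per field); alternative decomposition, same cost.


-- ===== PORT A =====
-- the loop body: overwrite one field of the dict by priority '+' then '.'
def pvStepA (t : PySem.Dict String (Option String)) (d : String) : PySem.Dict String (Option String) :=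
  if PySem.Str.isIn "+" d then t.insert "age" (some d)
  else if PySem.Str.isIn "." d then t.insert "rating" (some d)
  else t.insert "pieces" (some d)

def get_toys_info (toy_data : List String) : List (String × Option String) :=
  (toy_data.foldl pvStepA
    (PySem.Dict.mk [("age", none), ("pieces", none), ("rating", none)])).items

-- ===== PORT B =====
def get_toys_info_alt (toy_data : List String) : List (String × Option String) :=
  let rev := toy_data.reverse
  [("age", rev.find? (fun d => PySem.Str.isIn "+" d)),
   ("pieces", rev.find? (fun d => !PySem.Str.isIn "+" d && !PySem.Str.isIn "." d)),
   ("rating", rev.find? (fun d => !PySem.Str.isIn "+" d && PySem.Str.isIn "." d))]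

-- ===== PRECONDITION & SPEC =====
def Spec_get_toys_info (toy_data : List String) (out : List (String × Option String)) : Prop := out = get_toys_info_alt toy_data
instance (toy_data : List String) (out : List (String × Option String)) : Decidable (Spec_get_toys_info toy_data out) := by unfold Spec_get_toys_info; infer_instance

-- ===== CLAIM (what is proved, stated in full; the proofs are below) =====
def Claim_equal_get_toys_info : Prop := ∀ (toy_data : List String), Dom_get_toys_info toy_data → Spec_get_toys_info toy_data (get_toys_info toy_data)

-- ===== LEMMAS AND PROOFS =====
-- invariant of A's loop: the dict stays the three-entry literal, each field = last match (first in reverse)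
lemma pv_fold_items (xs : List String) (a p r : Option String) :
    (xs.foldl pvStepA (PySem.Dict.mk [("age", a), ("pieces", p), ("rating", r)])).items
    = [("age", ((xs.reverse.find? (fun d => PySem.Str.isIn "+" d)).map some).getD a),
       ("pieces", ((xs.reverse.find? (fun d => !PySem.Str.isIn "+" d && !PySem.Str.isIn "." d)).map some).getD p),
       ("rating", ((xs.reverse.find? (fun d => !PySem.Str.isIn "+" d && PySem.Str.isIn "." d)).map some).getD r)] := by
  induction xs generalizing a p r with
  | nil => rfl
  | cons x xs ih =>
    simp only [List.foldl_cons, List.reverse_cons, List.find?_append]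
    by_cases h1 : PySem.Chars.isIn ['+'] x.toList
    · have : pvStepA (PySem.Dict.mk [("age", a), ("pieces", p), ("rating", r)]) x
          = PySem.Dict.mk [("age", some x), ("pieces", p), ("rating", r)] := by
        simp [pvStepA, PySem.Str.isIn, h1, PySem.Dict.insert]
      rw [this, ih]
      cases hf : xs.reverse.find? (fun d => PySem.Str.isIn "+" d) <;> simp [PySem.Str.isIn, h1]
    · by_cases h2 : PySem.Chars.isIn ['.'] x.toList
      · have : pvStepA (PySem.Dict.mk [("age", a), ("pieces", p), ("rating", r)]) x
            = PySem.Dict.mk [("age", a), ("pieces", p), ("rating", some x)] := by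
          simp [pvStepA, PySem.Str.isIn, h1, h2, PySem.Dict.insert]
        rw [this, ih]
        cases hf : xs.reverse.find? (fun d => !PySem.Str.isIn "+" d && PySem.Str.isIn "." d) <;>
          simp [PySem.Str.isIn, h1, h2]
      · have : pvStepA (PySem.Dict.mk [("age", a), ("pieces", p), ("rating", r)]) x
            = PySem.Dict.mk [("age", a), ("pieces", some x), ("rating", r)] := by
          simp [pvStepA, PySem.Str.isIn, h1, h2, PySem.Dict.insert]
        rw [this, ih]
        cases hf : xs.reverse.find? (fun d => !PySem.Str.isIn "+" d && !PySem.Str.isIn "." d) <;>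
          simp [PySem.Str.isIn, h1, h2]

lemma pv_getD_map_none {α : Type} (o : Option α) : (o.map some).getD none = o := by
  cases o <;> rfl

-- ===== VERDICT (by name: the statement is the Claim_ definition above) =====
theorem get_toys_info_spec : Claim_equal_get_toys_info := by
  intro xs _
  unfold Spec_get_toys_info get_toys_info get_toys_info_alt
  rw [pv_fold_items]
  simp [pv_getD_map_none]
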